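-- pv_equiv track=rewrite | github.com/KurbyDoo/competitive_programming | DMOJ/dp/ccc15j5.py | givePies
-- ===== SOURCE A (Python) =====
-- dp = {}
--
-- def givePies(pies: int, people: int):
--     if pies < people:
--         return 0
--     if pies == people or people == 1:
--         return 1
--
--     if dp.get((pies, people), False):
--         return dp[(pies, people)]
--
--     dp[(pies, people)] = givePies(pies - people, people) + givePies(pies - 1, people - 1)
--     return dp[(pies, people)]
-- ===== SOURCE B (Python) =====
-- def givePies(pies: int, people: int):
--     if pies < people:
--         return 0
--     if pies == people or people == 1:
--         return 1
--     rows = []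
--     for p in range(pies + 1):
--         row = [0] * (people + 1)
--         for k in range(1, people + 1):
--             if p < k:
--                 row[k] = 0
--             elif p == k or k == 1:
--                 row[k] = 1
--             else:
--                 row[k] = rows[p - k][k] + rows[p - 1][k - 1]
--         rows.append(row)
--     return rows[pies][people]
-- ===== Notes on version B (the rewrite author's own statement) =====
-- stated objective: alternative
-- what changed: Replaces the memoized top-down recursion with an explicit bottom-up DP table filled row by row (no recursion, no global dict), reading off rows[pies][people].
import Mathlib
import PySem

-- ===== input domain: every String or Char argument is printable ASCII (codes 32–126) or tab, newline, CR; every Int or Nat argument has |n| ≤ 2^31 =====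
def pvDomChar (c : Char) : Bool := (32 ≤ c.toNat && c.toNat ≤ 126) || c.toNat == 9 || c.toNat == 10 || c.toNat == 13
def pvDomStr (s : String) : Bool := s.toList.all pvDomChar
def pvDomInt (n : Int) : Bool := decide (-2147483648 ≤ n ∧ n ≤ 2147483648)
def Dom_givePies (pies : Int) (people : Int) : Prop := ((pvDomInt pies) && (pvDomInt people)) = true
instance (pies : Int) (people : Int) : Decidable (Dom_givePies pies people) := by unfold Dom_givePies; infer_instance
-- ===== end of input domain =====

-- B replaces A's memoized top-down recursion by an explicit bottom-up DP table; same values, no recursion.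
-- A's global memo dict only caches values it would recompute identically, so the A-port is the plain
-- recursion; it is made total with a fuel parameter (fuel pies.toNat+1 suffices on Pre_).

-- ===== PORT A =====
def givePiesGo : Nat → Int → Int → Int
  | 0, _, _ => 0
  | fuel + 1, pies, people =>
    if pies < people then 0
    else if pies = people ∨ people = 1 then 1
    else givePiesGo fuel (pies - people) people + givePiesGo fuel (pies - 1) (people - 1)

def givePies (pies : Int) (people : Int) : Int :=
  givePiesGo (pies.toNat + 1) pies people

-- ===== PORT B =====
-- one row of the table: row[0] stays 0 (Python initializes [0]*(people+1) and fills k = 1..people)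
def altRow (rows : List (List Int)) (p : Nat) (people : Nat) : List Int :=
  (List.range (people + 1)).map fun k =>
    if k = 0 then 0
    else if p < k then 0
    else if p = k ∨ k = 1 then 1
    else ((rows.getD (p - k) []).getD k 0) + ((rows.getD (p - 1) []).getD (k - 1) 0)

def altRows (pies : Nat) (people : Nat) : List (List Int) :=
  (List.range (pies + 1)).foldl (fun rows p => rows ++ [altRow rows p people]) []

def givePies_alt (pies : Int) (people : Int) : Int :=
  if pies < people then 0
  else if pies = people ∨ people = 1 then 1
  else ((altRows pies.toNat people.toNat).getD pies.toNat []).getD people.toNat 0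

-- ===== PRECONDITION & SPEC =====
-- Pre_ excludes exactly the inputs where Python A recurses forever (RecursionError):
-- people ≤ 0 together with pies > people (otherwise an early return fires).
def Pre_givePies (pies : Int) (people : Int) : Prop := 1 ≤ people ∨ pies ≤ people
instance (pies : Int) (people : Int) : Decidable (Pre_givePies pies people) := by unfold Pre_givePies; infer_instance
def pvWitness_givePies : Int × Int := (5, 2)

def Spec_givePies (pies : Int) (people : Int) (out : Int) : Prop := out = givePies_alt pies people
instance (pies : Int) (people : Int) (out : Int) : Decidable (Spec_givePies pies people out) := by unfold Spec_givePies; infer_instance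

-- ===== CLAIM (what is proved, stated in full; the proofs are below) =====
def Claim_equal_givePies : Prop := ∀ (pies : Int) (people : Int), Dom_givePies pies people → Pre_givePies pies people → Spec_givePies pies people (givePies pies people)

-- ===== LEMMAS AND PROOFS =====

-- the common mathematical value: partitions of p into exactly k parts, A's base-case priority
def gp (p : Nat) (k : Nat) : Int :=
  if p < k then 0
  else if p = k ∨ k = 1 then 1
  else if k = 0 then 0
  else gp (p - k) k + gp (p - 1) (k - 1)
termination_by p
decreasing_by all_goals omega

-- A-side: with enough fuel and people ≥ 1, the recursion computes gp
theorem givePiesGo_eq_gp : ∀ (fuel : Nat) (pies people : Int), 1 ≤ people →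
    pies.toNat < fuel → givePiesGo fuel pies people = gp pies.toNat people.toNat := by
  intro fuel
  induction fuel with
  | zero => intro pies people _ h; omega
  | succ n ih =>
    intro pies people hpe hf
    rw [givePiesGo, gp]
    by_cases h1 : pies < people
    · rw [if_pos h1, if_pos (show pies.toNat < people.toNat by omega)]
    · rw [if_neg h1, if_neg (show ¬ pies.toNat < people.toNat by omega)]
      by_cases h2 : pies = people ∨ people = 1
      · rw [if_pos h2, if_pos (show pies.toNat = people.toNat ∨ people.toNat = 1 by omega)]
      · rw [if_neg h2, if_neg (show ¬ (pies.toNat = people.toNat ∨ people.toNat = 1) by omega),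
            if_neg (show ¬ people.toNat = 0 by omega)]
        rw [ih (pies - people) people (by omega) (by omega),
            ih (pies - 1) (people - 1) (by omega) (by omega)]
        congr 1 <;> congr 1 <;> omega

-- B-side table lemmas
theorem foldRows_succ (people n : Nat) :
    ((List.range (n+1)).foldl (fun rows p => rows ++ [altRow rows p people]) []) =
      ((List.range n).foldl (fun rows p => rows ++ [altRow rows p people]) []) ++
      [altRow ((List.range n).foldl (fun rows p => rows ++ [altRow rows p people]) []) n people] := by
  rw [List.range_succ, List.foldl_append]
  rfl

-- length of the partial fold
theorem foldRows_length (people : Nat) : ∀ (n : Nat),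
    ((List.range n).foldl (fun rows p => rows ++ [altRow rows p people]) []).length = n := by
  intro n
  induction n with
  | zero => rfl
  | succ m ih =>
    rw [foldRows_succ]
    simp [ih]

-- the fold only appends: later tables extend earlier ones
theorem foldRows_extend (people : Nat) : ∀ (m n : Nat), m ≤ n →
    ∃ t, ((List.range n).foldl (fun rows p => rows ++ [altRow rows p people]) []) =
      ((List.range m).foldl (fun rows p => rows ++ [altRow rows p people]) []) ++ t := by
  intro m n h
  induction n with
  | zero => exact ⟨[], by simp [Nat.le_zero.mp h]⟩
  | succ j ih =>
    by_cases hm : m = j + 1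
    · exact ⟨[], by simp [hm]⟩
    · obtain ⟨t, ht⟩ := ih (by omega)
      refine ⟨t ++ [altRow ((List.range j).foldl (fun rows p => rows ++ [altRow rows p people]) []) j people], ?_⟩
      rw [foldRows_succ, ht, List.append_assoc]

-- stable lookup: row p read in any table with > p rows equals row p of table p+1
theorem foldRows_getD (people : Nat) (p n : Nat) (h : p < n) :
    (((List.range n).foldl (fun rows p => rows ++ [altRow rows p people]) []).getD p []) =
    (((List.range (p+1)).foldl (fun rows q => rows ++ [altRow rows q people]) []).getD p []) := by
  obtain ⟨t, ht⟩ := foldRows_extend people (p+1) n (by omega)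
  rw [ht, List.getD, List.getD, List.getElem?_append_left (by rw [foldRows_length]; omega)]

-- main table invariant: entry (p, k) equals gp p k for 1 ≤ k ≤ people
theorem foldRows_entry (people : Nat) : ∀ (p : Nat), ∀ (k : Nat), 1 ≤ k → k ≤ people →
    ((((List.range (p+1)).foldl (fun rows q => rows ++ [altRow rows q people]) []).getD p []).getD k 0) = gp p k := by
  intro p
  induction p using Nat.strong_induction_on with
  | _ p ih =>
    intro k hk1 hkp
    have hrow : (((List.range (p+1)).foldl (fun rows q => rows ++ [altRow rows q people]) []).getD p []) =
        altRow ((List.range p).foldl (fun rows q => rows ++ [altRow rows q people]) []) p people := by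
      rw [foldRows_succ, List.getD,
          List.getElem?_append_right (by rw [foldRows_length])]
      simp [foldRows_length]
    rw [hrow, altRow]
    have hk : k < people + 1 := by omega
    rw [List.getD, List.getElem?_map, List.getElem?_range hk]
    simp only [Option.map_some, Option.getD_some]
    rw [gp, if_neg (by omega)]
    by_cases h1 : p < k
    · rw [if_pos h1, if_pos h1]
    · rw [if_neg h1, if_neg h1]
      by_cases h2 : p = k ∨ k = 1
      · rw [if_pos h2, if_pos h2]
      · rw [if_neg h2, if_neg h2, if_neg (show ¬ k = 0 by omega)]
        have hk2 : 2 ≤ k := by omega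
        have hpk : k < p := by omega
        rw [foldRows_getD people (p - k) p (by omega), foldRows_getD people (p - 1) p (by omega)]
        rw [ih (p - k) (by omega) k hk1 hkp, ih (p - 1) (by omega) (k - 1) (by omega) (by omega)]

-- ===== VERDICT (by name: the statement is the Claim_ definition above) =====
theorem givePies_spec : Claim_equal_givePies := by
  intro pies people _ hpre
  unfold Spec_givePies givePies givePies_alt
  rw [givePiesGo]
  by_cases h1 : pies < people
  · rw [if_pos h1, if_pos h1]
  · rw [if_neg h1, if_neg h1]
    by_cases h2 : pies = people ∨ people = 1
    · rw [if_pos h2, if_pos h2]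
    · rw [if_neg h2, if_neg h2]
      have hpe : 1 ≤ people := by
        rcases hpre with h | h
        · exact h
        · omega
      have hp2 : 2 ≤ people := by omega
      have hpg : people < pies := by omega
      rw [givePiesGo_eq_gp pies.toNat (pies - people) people (by omega) (by omega),
          givePiesGo_eq_gp pies.toNat (pies - 1) (people - 1) (by omega) (by omega)]
      have hE := foldRows_entry people.toNat pies.toNat people.toNat (by omega) (le_refl _)
      have hg : gp pies.toNat people.toNat =
          gp (pies.toNat - people.toNat) people.toNat + gp (pies.toNat - 1) (people.toNat - 1) := by
        rw [gp, if_neg (show ¬ pies.toNat < people.toNat by omega),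
            if_neg (show ¬ (pies.toNat = people.toNat ∨ people.toNat = 1) by omega),
            if_neg (show ¬ people.toNat = 0 by omega)]
      unfold altRows
      rw [hE, hg]
      congr 1 <;> congr 1 <;> omega
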